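-- pv_equiv track=rewrite | github.com/primecyberinfotec/cyberprimer | api/modules/vuln_check.py | categorize_findings
-- ===== SOURCE A (Python) =====
-- def categorize_findings(all_findings: list) -> dict:
--     """Categoriza vulnerabilidades por severidade e remove duplicatas."""
--     result = {"critical": [], "high": [], "medium": [], "low": [], "info": []}
--     seen   = set()
--
--     for f in all_findings:
--         key = f.get("cve") or f.get("title", "")
--         if key in seen:
--             continue
--         seen.add(key)
--
--         sev = (f.get("severity") or "info").lower()
--         if sev == "critical":
--             result["critical"].append(f)
--         elif sev == "high":
--             result["high"].append(f)
--         elif sev in ("medium", "moderate"):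
--             result["medium"].append(f)
--         elif sev == "low":
--             result["low"].append(f)
--         else:
--             result["info"].append(f)
--
--     return result
-- ===== SOURCE B (Python) =====
-- SEV_BUCKETS = ("critical", "high", "medium", "low", "info")
--
-- def _key(f):
--     return f.get("cve") or f.get("title", "")
--
-- def _bucket(f):
--     sev = (f.get("severity") or "info").lower()
--     if sev == "moderate":
--         sev = "medium"
--     return sev if sev in ("critical", "high", "medium", "low") else "info"
--
-- def categorize_findings(all_findings: list) -> dict:
--     deduped = []
--     seen = set()
--     for f in all_findings:
--         k = _key(f)
--         if k not in seen:
--             seen.add(k)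
--             deduped.append(f)
--     return {b: [f for f in deduped if _bucket(f) == b] for b in SEV_BUCKETS}
-- ===== Notes on version B (the rewrite author's own statement) =====
-- stated objective: idiomatic
-- what changed: A's single loop that dispatches each new finding through a severity if/elif ladder into dict buckets is replaced by two phases: one dedup pass collecting the unique findings in order, then a dict comprehension building each of the five fixed buckets as a filtered comprehension over the deduplicated list keyed by a small bucket function.
import Mathlib
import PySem

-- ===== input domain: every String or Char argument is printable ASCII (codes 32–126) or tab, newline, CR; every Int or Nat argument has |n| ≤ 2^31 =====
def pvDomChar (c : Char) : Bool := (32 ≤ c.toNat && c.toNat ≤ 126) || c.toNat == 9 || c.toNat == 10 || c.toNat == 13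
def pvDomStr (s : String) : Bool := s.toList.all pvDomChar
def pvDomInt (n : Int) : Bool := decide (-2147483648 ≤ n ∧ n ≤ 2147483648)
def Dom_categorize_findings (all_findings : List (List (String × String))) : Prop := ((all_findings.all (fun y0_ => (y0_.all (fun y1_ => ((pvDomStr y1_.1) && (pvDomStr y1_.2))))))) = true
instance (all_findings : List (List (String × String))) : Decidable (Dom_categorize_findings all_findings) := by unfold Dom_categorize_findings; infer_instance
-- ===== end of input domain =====

-- B replaces A's single loop (dedup check plus a severity if/elif ladder appending into a dict)
-- by two phases: one dedup pass, then one filtered comprehension per fixed bucket (objective: idiomatic).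

-- shared Python-expression helpers (the same subexpressions occur verbatim in both sources)
-- Python's `x or y` on an optional string: None and "" are falsy
def pvOrStr (a : Option String) (b : String) : String :=
  match a with
  | some s => if s = "" then b else s
  | none => b

-- key = f.get("cve") or f.get("title", "")
def pvKey (f : List (String × String)) : String :=
  pvOrStr ((PySem.Dict.mk f).get? "cve") ((PySem.Dict.mk f).getD "title" "")

-- sev = (f.get("severity") or "info").lower()
def pvSev (f : List (String × String)) : String :=
  PySem.Str.lower (pvOrStr ((PySem.Dict.mk f).get? "severity") "info")

-- ===== PORT A =====
-- one iteration of A's `for f in all_findings` loop over the state (result, seen)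
def pvStepA (st : PySem.Dict String (List (List (String × String))) × PySem.Set String)
    (f : List (String × String)) :
    PySem.Dict String (List (List (String × String))) × PySem.Set String :=
  let key := pvKey f
  if PySem.Set.contains st.2 key then st
  else
    let seen := PySem.Set.add st.2 key
    let sev := pvSev f
    let result :=
      if sev = "critical" then PySem.Dict.modify st.1 "critical" [] (· ++ [f])
      else if sev = "high" then PySem.Dict.modify st.1 "high" [] (· ++ [f])
      else if sev = "medium" ∨ sev = "moderate" then PySem.Dict.modify st.1 "medium" [] (· ++ [f])
      else if sev = "low" then PySem.Dict.modify st.1 "low" [] (· ++ [f])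
      else PySem.Dict.modify st.1 "info" [] (· ++ [f])
    (result, seen)

def categorize_findings (all_findings : List (List (String × String))) : List (String × List (List (String × String))) :=
  let init : PySem.Dict String (List (List (String × String))) :=
    PySem.Dict.mk [("critical", []), ("high", []), ("medium", []), ("low", []), ("info", [])]
  (all_findings.foldl pvStepA (init, PySem.Set.empty)).1.items

-- ===== PORT B =====
-- _bucket(f) from Source B
def pvBucket (f : List (String × String)) : String :=
  let sev := pvSev f
  let sev := if sev = "moderate" then "medium" else sev
  if sev = "critical" ∨ sev = "high" ∨ sev = "medium" ∨ sev = "low" then sev else "info"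

-- one iteration of Source B's dedup loop over the state (deduped, seen)
def pvStepB (st : List (List (String × String)) × PySem.Set String)
    (f : List (String × String)) : List (List (String × String)) × PySem.Set String :=
  let k := pvKey f
  if PySem.Set.contains st.2 k then st
  else (st.1 ++ [f], PySem.Set.add st.2 k)

def categorize_findings_alt (all_findings : List (List (String × String))) : List (String × List (List (String × String))) :=
  let dd := all_findings.foldl pvStepB ([], PySem.Set.empty)
  ["critical", "high", "medium", "low", "info"].map
    (fun b => (b, dd.1.filter (fun f => pvBucket f == b)))

-- ===== PRECONDITION & SPEC =====
def Spec_categorize_findings (all_findings : List (List (String × String))) (out : List (String × List (List (String × String)))) : Prop := out = categorize_findings_alt all_findings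
instance (all_findings : List (List (String × String))) (out : List (String × List (List (String × String)))) : Decidable (Spec_categorize_findings all_findings out) := by unfold Spec_categorize_findings; infer_instance

-- ===== CLAIM (what is proved, stated in full; the proofs are below) =====
def Claim_equal_categorize_findings : Prop := ∀ (all_findings : List (List (String × String))), Dom_categorize_findings all_findings → Spec_categorize_findings all_findings (categorize_findings all_findings)

-- ===== LEMMAS AND PROOFS =====

-- the deduplicated sublist, written as a structural recursion (proof-side view of both loops)
def pvDedupRec : List (List (String × String)) → PySem.Set String → List (List (String × String))
  | [], _ => []
  | f :: fs, seen =>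
    if PySem.Set.contains seen (pvKey f) then pvDedupRec fs seen
    else f :: pvDedupRec fs (PySem.Set.add seen (pvKey f))

lemma stepA_mem {st : PySem.Dict String (List (List (String × String))) × PySem.Set String}
    {f : List (String × String)} (hs : PySem.Set.contains st.2 (pvKey f) = true) :
    pvStepA st f = st := by
  have hm : pvKey f ∈ st.2 := (PySem.Set.contains_iff _ _).mp hs
  simp [pvStepA, hm]

lemma stepB_mem {st : List (List (String × String)) × PySem.Set String}
    {f : List (String × String)} (hs : PySem.Set.contains st.2 (pvKey f) = true) :
    pvStepB st f = st := by
  have hm : pvKey f ∈ st.2 := (PySem.Set.contains_iff _ _).mp hs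
  simp [pvStepB, hm]

lemma stepB_not_mem {st : List (List (String × String)) × PySem.Set String}
    {f : List (String × String)} (hs : PySem.Set.contains st.2 (pvKey f) = false) :
    pvStepB st f = (st.1 ++ [f], PySem.Set.add st.2 (pvKey f)) := by
  have hm : pvKey f ∉ st.2 := by
    intro hm; rw [← PySem.Set.contains_iff, hs] at hm; cases hm
  simp [pvStepB, hm]


lemma bucket_of_sev_critical {f : List (String × String)} (h : pvSev f = "critical") :
    pvBucket f = "critical" := by simp [pvBucket, h]

lemma bucket_of_sev_high {f : List (String × String)} (h : pvSev f = "high") :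
    pvBucket f = "high" := by simp [pvBucket, h]

lemma bucket_of_sev_medium {f : List (String × String)} (h : pvSev f = "medium" ∨ pvSev f = "moderate") :
    pvBucket f = "medium" := by rcases h with h | h <;> simp [pvBucket, h]

lemma bucket_of_sev_low {f : List (String × String)} (h : pvSev f = "low") :
    pvBucket f = "low" := by simp [pvBucket, h]

lemma bucket_of_sev_other {f : List (String × String)}
    (h1 : ¬ pvSev f = "critical") (h2 : ¬ pvSev f = "high")
    (h3 : ¬ (pvSev f = "medium" ∨ pvSev f = "moderate")) (h4 : ¬ pvSev f = "low") :
    pvBucket f = "info" := by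
  rw [not_or] at h3
  simp [pvBucket, h3.2, h1, h2, h3.1, h4]

lemma pvBucket_total (f : List (String × String)) :
    pvBucket f = "critical" ∨ pvBucket f = "high" ∨ pvBucket f = "medium" ∨
      pvBucket f = "low" ∨ pvBucket f = "info" := by
  by_cases h1 : pvSev f = "critical"
  · exact Or.inl (bucket_of_sev_critical h1)
  by_cases h2 : pvSev f = "high"
  · exact Or.inr (Or.inl (bucket_of_sev_high h2))
  by_cases h3 : pvSev f = "medium" ∨ pvSev f = "moderate"
  · exact Or.inr (Or.inr (Or.inl (bucket_of_sev_medium h3)))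
  by_cases h4 : pvSev f = "low"
  · exact Or.inr (Or.inr (Or.inr (Or.inl (bucket_of_sev_low h4))))
  exact Or.inr (Or.inr (Or.inr (Or.inr (bucket_of_sev_other h1 h2 h3 h4))))

-- one unseen step of A's loop on the five-bucket dict appends f to exactly the bucket pvBucket f
lemma stepA_char (c h m l i : List (List (String × String))) (seen : PySem.Set String)
    (f : List (String × String)) (hs : PySem.Set.contains seen (pvKey f) = false) :
    pvStepA (PySem.Dict.mk [("critical", c), ("high", h), ("medium", m), ("low", l), ("info", i)], seen) f
      = (PySem.Dict.mk
          [("critical", c ++ if pvBucket f == "critical" then [f] else []),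
           ("high", h ++ if pvBucket f == "high" then [f] else []),
           ("medium", m ++ if pvBucket f == "medium" then [f] else []),
           ("low", l ++ if pvBucket f == "low" then [f] else []),
           ("info", i ++ if pvBucket f == "info" then [f] else [])],
         PySem.Set.add seen (pvKey f)) := by
  have hm : pvKey f ∉ seen := by
    intro hm; rw [← PySem.Set.contains_iff, hs] at hm; cases hm
  by_cases h1 : pvSev f = "critical"
  · simp [pvStepA, hm, h1, bucket_of_sev_critical h1, PySem.Dict.modify, PySem.Dict.insert,
      PySem.Dict.getD, PySem.Dict.get?, PySem.Dict.contains]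
  · by_cases h2 : pvSev f = "high"
    · simp [pvStepA, hm, h2, bucket_of_sev_high h2, PySem.Dict.modify, PySem.Dict.insert,
        PySem.Dict.getD, PySem.Dict.get?, PySem.Dict.contains]
    · by_cases h3 : pvSev f = "medium" ∨ pvSev f = "moderate"
      · simp [pvStepA, hm, h1, h2, h3, bucket_of_sev_medium h3, PySem.Dict.modify, PySem.Dict.insert,
          PySem.Dict.getD, PySem.Dict.get?, PySem.Dict.contains]
      · by_cases h4 : pvSev f = "low"
        · simp [pvStepA, hm, h4, bucket_of_sev_low h4, PySem.Dict.modify, PySem.Dict.insert,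
            PySem.Dict.getD, PySem.Dict.get?, PySem.Dict.contains]
        · simp [pvStepA, hm, h1, h2, h3, h4, bucket_of_sev_other h1 h2 h3 h4, PySem.Dict.modify,
            PySem.Dict.insert, PySem.Dict.getD, PySem.Dict.get?, PySem.Dict.contains]

lemma altLoop_eq_dedupRec (fs : List (List (String × String))) :
    ∀ (d : List (List (String × String))) (seen : PySem.Set String),
    (fs.foldl pvStepB (d, seen)).1 = d ++ pvDedupRec fs seen := by
  induction fs with
  | nil => intro d seen; simp [pvDedupRec]
  | cons f fs ih =>
    intro d seen
    rw [List.foldl_cons]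
    by_cases hs : PySem.Set.contains seen (pvKey f)
    · rw [stepB_mem hs]
      simp only [pvDedupRec, hs, if_true, ih]
    · rw [Bool.not_eq_true] at hs
      rw [stepB_not_mem hs]
      simp only [pvDedupRec, hs, Bool.false_eq_true, if_false, ih, List.append_assoc,
        List.singleton_append]

-- A's loop, started on the five-bucket dict, appends exactly the per-bucket filters of the dedup list
lemma aLoop_eq_filters (fs : List (List (String × String))) :
    ∀ (seen : PySem.Set String) (c h m l i : List (List (String × String))),
    ((fs.foldl pvStepA
      (PySem.Dict.mk [("critical", c), ("high", h), ("medium", m), ("low", l), ("info", i)], seen)).1).items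
    = [("critical", c ++ (pvDedupRec fs seen).filter (fun f => pvBucket f == "critical")),
       ("high", h ++ (pvDedupRec fs seen).filter (fun f => pvBucket f == "high")),
       ("medium", m ++ (pvDedupRec fs seen).filter (fun f => pvBucket f == "medium")),
       ("low", l ++ (pvDedupRec fs seen).filter (fun f => pvBucket f == "low")),
       ("info", i ++ (pvDedupRec fs seen).filter (fun f => pvBucket f == "info"))] := by
  induction fs with
  | nil => intro seen c h m l i; simp [pvDedupRec]
  | cons f fs ih =>
    intro seen c h m l i
    rw [List.foldl_cons]
    by_cases hs : PySem.Set.contains seen (pvKey f)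
    · rw [stepA_mem hs]
      simp only [pvDedupRec, hs, if_true, ih]
    · rw [Bool.not_eq_true] at hs
      rw [stepA_char c h m l i seen f hs]
      have hm : pvKey f ∉ seen := by
        intro hm; rw [← PySem.Set.contains_iff, hs] at hm; cases hm
      rcases pvBucket_total f with hb | hb | hb | hb | hb <;>
        simp [ih, pvDedupRec, hm, hb, List.append_assoc]

-- ===== VERDICT (by name: the statement is the Claim_ definition above) =====
theorem categorize_findings_spec : Claim_equal_categorize_findings := by
  intro fs _
  unfold Spec_categorize_findings categorize_findings categorize_findings_alt
  simp only [aLoop_eq_filters, altLoop_eq_dedupRec, List.nil_append, List.map]
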